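-- pv_equiv track=rewrite | github.com/Labic-ICMC-USP/multi-annotator-labelstudio-pipeline | labelstudio-export/report.py | categorize_span_differences
-- ===== SOURCE A (Python) =====
-- from typing import Any, Optional, Sequence, Tuple
--
-- SPAN = Tuple[str, int, int]
--
-- def overlap(a: SPAN, b: SPAN) -> bool:
--     return max(a[1], b[1]) < min(a[2], b[2])
--
-- def categorize_span_differences(a_only: set[SPAN], b_only: set[SPAN]) -> tuple[int, int, int, list[str]]:
--     remaining_b = set(b_only)
--     boundary = 0
--     label = 0
--     examples: list[str] = []
--
--     for a in sorted(a_only):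
--         candidate_same = None
--         candidate_diff = None
--         for b in sorted(remaining_b):
--             if overlap(a, b):
--                 if a[0] == b[0]:
--                     candidate_same = b
--                     break
--                 if candidate_diff is None:
--                     candidate_diff = b
--         if candidate_same is not None:
--             boundary += 1
--             remaining_b.remove(candidate_same)
--             if len(examples) < 4:
--                 examples.append(f"boundary: {a} vs {candidate_same}")
--         elif candidate_diff is not None:
--             label += 1
--             remaining_b.remove(candidate_diff)
--             if len(examples) < 4:
--                 examples.append(f"label: {a} vs {candidate_diff}")
--
--     missing_extra = max(0, len(a_only) + len(b_only) - 2 * (boundary + label))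
--     return boundary, label, missing_extra, examples
-- ===== SOURCE B (Python) =====
-- def categorize_span_differences(a_only, b_only):
--     remaining = sorted(set(b_only))
--     buckets = {}
--     for b in remaining:
--         buckets.setdefault(b[0], []).append(b)
--     boundary = 0
--     label = 0
--     examples = []
--     for a in sorted(set(a_only)):
--         kind = "boundary"
--         cand = None
--         for b in buckets.get(a[0], []):
--             if max(a[1], b[1]) < min(a[2], b[2]):
--                 cand = b
--                 break
--         if cand is None:
--             kind = "label"
--             for b in remaining:
--                 if max(a[1], b[1]) < min(a[2], b[2]):
--                     cand = b
--                     break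
--         if cand is not None:
--             if kind == "boundary":
--                 boundary += 1
--             else:
--                 label += 1
--             remaining.remove(cand)
--             buckets[cand[0]].remove(cand)
--             if len(examples) < 4:
--                 examples.append(f"{kind}: {a} vs {cand}")
--     missing_extra = max(0, len(set(a_only)) + len(set(b_only)) - 2 * (boundary + label))
--     return boundary, label, missing_extra, examples
-- ===== Notes on version B (the rewrite author's own statement) =====
-- stated objective: faster
-- what changed: B builds a per-label bucket index (dict label -> sorted spans) of b_only once and maintains it plus one sorted remaining list under removals, so the same-label search scans only the bucket and nothing is ever re-sorted, replacing A's re-sort-and-full-scan of the remaining set on every outer iteration.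
import Mathlib
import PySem

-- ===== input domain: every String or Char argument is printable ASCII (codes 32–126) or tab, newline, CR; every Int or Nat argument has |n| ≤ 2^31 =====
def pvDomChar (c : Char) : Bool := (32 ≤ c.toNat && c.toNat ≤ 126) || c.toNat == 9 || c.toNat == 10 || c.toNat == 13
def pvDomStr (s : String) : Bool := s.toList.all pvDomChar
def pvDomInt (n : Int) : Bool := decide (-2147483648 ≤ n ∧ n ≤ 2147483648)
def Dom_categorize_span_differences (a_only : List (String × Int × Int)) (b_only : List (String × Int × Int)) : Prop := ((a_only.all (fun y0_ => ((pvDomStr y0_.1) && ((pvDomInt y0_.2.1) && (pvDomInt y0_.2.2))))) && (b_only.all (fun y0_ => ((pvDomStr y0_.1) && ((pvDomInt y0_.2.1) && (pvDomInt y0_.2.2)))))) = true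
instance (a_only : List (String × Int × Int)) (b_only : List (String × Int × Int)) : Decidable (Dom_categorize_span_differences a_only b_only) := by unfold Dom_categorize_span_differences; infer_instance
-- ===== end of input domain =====

-- B indexes the b-spans by label ONCE (dict label -> sorted spans) and keeps one sorted remaining
-- list maintained under removals, so the same-label search scans only its bucket and nothing is
-- ever re-sorted, replacing A's re-sort-and-full-scan of the remaining set on every iteration.

-- ---- helpers shared by both ports: Python's tuple ordering and the f-string formatting ----
-- Python compares (str, int, int) tuples lexicographically: the Lex product order.
def pvKey (x : String × Int × Int) : Lex (String × Lex (Int × Int)) := toLex (x.1, toLex (x.2.1, x.2.2))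

-- overlap(a, b) from the module
def pvOverlap (a b : String × Int × Int) : Bool := decide (max a.2.1 b.2.1 < min a.2.2 b.2.2)

-- Python repr of a str over the Dom charset (printable ASCII + tab/newline/CR): single quotes
-- unless the string contains ' and no ", escapes \\ , the quote char, \t, \n, \r.
def pvReprChars (q : Char) : List Char → List Char
  | [] => []
  | c :: cs =>
    (if c = '\\' then ['\\', '\\']
     else if c = q then ['\\', q]
     else if c = '\t' then ['\\', 't']
     else if c = '\n' then ['\\', 'n']
     else if c = '\r' then ['\\', 'r']
     else [c]) ++ pvReprChars q cs

def pvReprStr (s : String) : String :=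
  let cs := s.toList
  let q : Char := if cs.contains '\'' && !cs.contains '"' then '"' else '\''
  String.ofList (q :: (pvReprChars q cs ++ [q]))

-- str of a (str, int, int) tuple, as Python's f-string prints it
def pvReprSpan (x : String × Int × Int) : String :=
  "(" ++ pvReprStr x.1 ++ ", " ++ PySem.Int.toStr x.2.1 ++ ", " ++ PySem.Int.toStr x.2.2 ++ ")"

-- f"{kind}: {a} vs {c}"
def pvEx (kind : String) (a c : String × Int × Int) : String :=
  kind ++ ": " ++ pvReprSpan a ++ " vs " ++ pvReprSpan c

-- ===== PORT A =====
-- inner 'for b in sorted(remaining_b)' loop: returns (candidate_same, candidate_diff)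
def pvScanA (a : String × Int × Int) :
    List (String × Int × Int) → Option (String × Int × Int) →
    Option (String × Int × Int) × Option (String × Int × Int)
  | [], cd => (none, cd)
  | b :: rest, cd =>
    if pvOverlap a b then
      if a.1 == b.1 then (some b, cd)                    -- break
      else pvScanA a rest (if cd.isNone then some b else cd)
    else pvScanA a rest cd

-- one iteration of 'for a in sorted(a_only)'; state = (remaining_b, boundary, label, examples).
-- remaining_b.remove(c): Set.discard is exact here — c was found in remaining_b, so no KeyError.
def pvStepA (st : PySem.Set (String × Int × Int) × Int × Int × List String)
    (a : String × Int × Int) : PySem.Set (String × Int × Int) × Int × Int × List String :=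
  match pvScanA a (PySem.List.sorted st.1 pvKey false) none with
  | (some c, _) =>
      (PySem.Set.discard st.1 c, st.2.1 + 1, st.2.2.1,
       if st.2.2.2.length < 4 then st.2.2.2 ++ [pvEx "boundary" a c] else st.2.2.2)
  | (none, some c) =>
      (PySem.Set.discard st.1 c, st.2.1, st.2.2.1 + 1,
       if st.2.2.2.length < 4 then st.2.2.2 ++ [pvEx "label" a c] else st.2.2.2)
  | (none, none) => st

def categorize_span_differences (a_only : List (String × Int × Int)) (b_only : List (String × Int × Int)) : Int × Int × Int × List String :=
  let st := (PySem.List.sorted (PySem.Set.ofList a_only) pvKey false).foldl pvStepA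
              (PySem.Set.ofList b_only, 0, 0, [])
  let missing_extra := max 0 (PySem.Set.len (PySem.Set.ofList a_only) +
                              PySem.Set.len (PySem.Set.ofList b_only) - 2 * (st.2.1 + st.2.2.1))
  (st.2.1, st.2.2.1, missing_extra, st.2.2.2)

-- ===== PORT B =====
-- buckets: 'for b in remaining: buckets.setdefault(b[0], []).append(b)'
def pvBuckets (rem : List (String × Int × Int)) :
    PySem.Dict String (List (String × Int × Int)) :=
  rem.foldl (fun d b => d.modify b.1 [] (· ++ [b])) PySem.Dict.empty

-- one iteration: bucket scan for a same-label overlap, else global scan; removal from both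
-- structures. state = (buckets, remaining, boundary, label, examples).
def pvStepB (st : PySem.Dict String (List (String × Int × Int)) ×
                  List (String × Int × Int) × Int × Int × List String)
    (a : String × Int × Int) :
    PySem.Dict String (List (String × Int × Int)) ×
    List (String × Int × Int) × Int × Int × List String :=
  match (st.1.getD a.1 []).find? (fun b => pvOverlap a b) with
  | some c =>
      (st.1.modify c.1 [] (fun l => l.erase c), st.2.1.erase c,
       st.2.2.1 + 1, st.2.2.2.1,
       if st.2.2.2.2.length < 4 then st.2.2.2.2 ++ [pvEx "boundary" a c] else st.2.2.2.2)
  | none =>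
    match st.2.1.find? (fun b => pvOverlap a b) with
    | some c =>
        (st.1.modify c.1 [] (fun l => l.erase c), st.2.1.erase c,
         st.2.2.1, st.2.2.2.1 + 1,
         if st.2.2.2.2.length < 4 then st.2.2.2.2 ++ [pvEx "label" a c] else st.2.2.2.2)
    | none => st

def categorize_span_differences_alt (a_only : List (String × Int × Int)) (b_only : List (String × Int × Int)) : Int × Int × Int × List String :=
  let rem := PySem.List.sorted (PySem.Set.ofList b_only) pvKey false
  let st := (PySem.List.sorted (PySem.Set.ofList a_only) pvKey false).foldl pvStepB
              (pvBuckets rem, rem, 0, 0, [])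
  let missing_extra := max 0 (PySem.Set.len (PySem.Set.ofList a_only) +
                              PySem.Set.len (PySem.Set.ofList b_only) - 2 * (st.2.2.1 + st.2.2.2.1))
  (st.2.2.1, st.2.2.2.1, missing_extra, st.2.2.2.2)

-- ===== PRECONDITION & SPEC =====
def Spec_categorize_span_differences (a_only : List (String × Int × Int)) (b_only : List (String × Int × Int)) (out : Int × Int × Int × List String) : Prop := out = categorize_span_differences_alt a_only b_only
instance (a_only : List (String × Int × Int)) (b_only : List (String × Int × Int)) (out : Int × Int × Int × List String) : Decidable (Spec_categorize_span_differences a_only b_only out) := by unfold Spec_categorize_span_differences; infer_instance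

-- ===== CLAIM (what is proved, stated in full; the proofs are below) =====
def Claim_equal_categorize_span_differences : Prop := ∀ (a_only : List (String × Int × Int)) (b_only : List (String × Int × Int)), Dom_categorize_span_differences a_only b_only → Spec_categorize_span_differences a_only b_only (categorize_span_differences a_only b_only)

-- ===== LEMMAS AND PROOFS =====

lemma pvKey_injective : Function.Injective pvKey := by
  intro x y h
  simp only [pvKey] at h
  have h' := congrArg (fun z => ofLex z) h
  simp only [ofLex_toLex] at h'
  obtain ⟨h1, h2⟩ := Prod.mk.injEq .. ▸ h'
  have h2' := congrArg (fun z => ofLex z) h2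
  simp only [ofLex_toLex] at h2'
  obtain ⟨h3, h4⟩ := Prod.mk.injEq .. ▸ h2'
  exact Prod.ext h1 (Prod.ext h3 h4)

-- candidate_same is the first b (in scan order) with overlap and the same label
lemma pvScanA_fst (a : String × Int × Int) (s : List (String × Int × Int)) :
    ∀ cd, (pvScanA a s cd).1 = s.find? (fun b => a.1 == b.1 && pvOverlap a b) := by
  induction s with
  | nil => intro cd; simp [pvScanA]
  | cons b rest ih =>
    intro cd
    by_cases hov : pvOverlap a b
    · by_cases hsame : a.1 == b.1
      · simp [pvScanA, hov, hsame, List.find?]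
      · simp [pvScanA, hov, hsame, List.find?, ih]
    · simp [pvScanA, hov, List.find?, ih]

-- when no same-label candidate exists, candidate_diff is cd or else the first overlapping b
lemma pvScanA_snd (a : String × Int × Int) (s : List (String × Int × Int)) :
    ∀ cd, (pvScanA a s cd).1 = none →
      (pvScanA a s cd).2 = cd.or (s.find? (fun b => pvOverlap a b)) := by
  induction s with
  | nil => intro cd _; simp [pvScanA]
  | cons b rest ih =>
    intro cd h
    rw [pvScanA_fst] at h
    simp only [pvScanA]
    by_cases hov : pvOverlap a b = true
    · by_cases hsame : (a.1 == b.1) = true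
      · exfalso; simp [hsame, hov] at h
      · rw [if_pos hov, if_neg hsame]
        have h' : rest.find? (fun b => a.1 == b.1 && pvOverlap a b) = none := by
          simpa [List.find?_cons, hsame, hov] using h
        have h'' : (pvScanA a rest (if cd.isNone then some b else cd)).1 = none := by
          rw [pvScanA_fst]; exact h'
        rw [ih _ h'']
        cases cd <;> simp [hov]
    · rw [if_neg hov]
      have h' : rest.find? (fun b => a.1 == b.1 && pvOverlap a b) = none := by
        simpa [List.find?_cons, hov] using h
      have h'' : (pvScanA a rest cd).1 = none := by rw [pvScanA_fst]; exact h'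
      rw [ih _ h'']
      simp [hov]

lemma pv_sorted_pairwise_lt (l : List (String × Int × Int)) (h : l.Nodup) :
    (PySem.List.sorted l pvKey false).Pairwise (fun a b => pvKey a < pvKey b) := by
  have hnd : (PySem.List.sorted l pvKey false).Nodup :=
    (PySem.List.sorted_perm l pvKey false).nodup_iff.mpr h
  have hle := PySem.List.sorted_pairwise l pvKey
  refine (hle.and hnd).imp ?_
  rintro a b ⟨h1, h2⟩
  exact lt_of_le_of_ne h1 (fun he => h2 (pvKey_injective he))

lemma pv_sorted_discard (l : List (String × Int × Int)) (h : l.Nodup)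
    (c : String × Int × Int) :
    PySem.List.sorted (PySem.Set.discard l c) pvKey false =
      (PySem.List.sorted l pvKey false).erase c := by
  apply PySem.List.sorted_eq_of_perm_of_pairwise_lt
  · have h1 : (PySem.List.sorted l pvKey false).erase c |>.Perm (l.erase c) :=
      (PySem.List.sorted_perm l pvKey false).erase c
    have h2 : l.erase c = PySem.Set.discard l c := by
      rw [List.Nodup.erase_eq_filter h]
      simp [PySem.Set.discard]
      rfl
    exact h2 ▸ h1
  · exact (pv_sorted_pairwise_lt l h).sublist (List.erase_sublist ..)

-- the bucket of lab is the label-lab slice of the list it was built from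
lemma pvBuckets_getD (rem : List (String × Int × Int)) (lab : String) :
    (pvBuckets rem).getD lab [] = rem.filter (fun b => b.1 == lab) := by
  unfold pvBuckets
  rw [show (rem.foldl (fun d b => d.modify b.1 [] (· ++ [b])) PySem.Dict.empty)
        = ((rem.map (fun b => (b.1, b))).foldl
            (fun d p => d.modify p.1 [] (· ++ [p.2])) PySem.Dict.empty) from
      by rw [List.foldl_map]]
  rw [PySem.Dict.getD_foldl_modify_append]
  simp [List.filter_map, Function.comp_def]

-- finding the first overlap inside the lab-bucket = finding the first same-label overlap globally
lemma pv_find_filter (a : String × Int × Int) (s : List (String × Int × Int)) :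
    (s.filter (fun b => b.1 == a.1)).find? (fun b => pvOverlap a b)
      = s.find? (fun b => a.1 == b.1 && pvOverlap a b) := by
  induction s with
  | nil => simp
  | cons b rest ih =>
    by_cases h : b.1 = a.1
    · by_cases hov : pvOverlap a b = true
      · simp [h, hov]
      · simp [h, hov, ih]
    · simp [h, Ne.symm h, ih]

-- removing c commutes with the label slices
lemma pv_filter_erase (s : List (String × Int × Int)) (h : s.Nodup)
    (c : String × Int × Int) (lab : String) :
    (s.erase c).filter (fun b => b.1 == lab)
      = if lab = c.1 then (s.filter (fun b => b.1 == lab)).erase c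
        else s.filter (fun b => b.1 == lab) := by
  rw [List.Nodup.erase_eq_filter h]
  by_cases hc : lab = c.1
  · rw [if_pos hc, List.Nodup.erase_eq_filter (h.filter _), List.filter_filter,
        List.filter_filter]
    apply List.filter_congr; intro x _
    simp [Bool.and_comm]
  · rw [if_neg hc, List.filter_filter]
    apply List.filter_congr; intro x _
    by_cases hx : x = c
    · subst hx; simp; exact fun he => (hc he.symm).elim
    · simp [hx]

-- one step of B, run on the bucket view of A's remaining set, simulates one step of A
lemma pv_step_eq (rem : List (String × Int × Int))
    (d : PySem.Dict String (List (String × Int × Int))) (t : Int × Int × List String)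
    (a : String × Int × Int) (h : rem.Nodup)
    (hinv : ∀ lab, d.getD lab []
        = (PySem.List.sorted rem pvKey false).filter (fun b => b.1 == lab)) :
    ∃ d', pvStepB (d, PySem.List.sorted rem pvKey false, t) a
        = (d', PySem.List.sorted (pvStepA (rem, t) a).1 pvKey false, (pvStepA (rem, t) a).2) ∧
      (∀ lab, d'.getD lab []
        = (PySem.List.sorted (pvStepA (rem, t) a).1 pvKey false).filter (fun b => b.1 == lab)) ∧
      (pvStepA (rem, t) a).1.Nodup := by
  have hsnod : (PySem.List.sorted rem pvKey false).Nodup :=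
    (PySem.List.sorted_perm rem pvKey false).nodup_iff.mpr h
  have hfstA := pvScanA_fst a (PySem.List.sorted rem pvKey false) none
  have hbfind : (d.getD a.1 []).find? (fun b => pvOverlap a b)
      = (PySem.List.sorted rem pvKey false).find? (fun b => a.1 == b.1 && pvOverlap a b) := by
    rw [hinv a.1, pv_find_filter]
  obtain ⟨b0, l0, e0⟩ := t
  cases hc : (PySem.List.sorted rem pvKey false).find? (fun b => a.1 == b.1 && pvOverlap a b) with
  | some c =>
    have hA : pvStepA (rem, b0, l0, e0) a =
        (PySem.Set.discard rem c, b0 + 1, l0,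
         if e0.length < 4 then e0 ++ [pvEx "boundary" a c] else e0) := by
      simp only [pvStepA]
      rw [show pvScanA a (PySem.List.sorted rem pvKey false) none =
            ((pvScanA a (PySem.List.sorted rem pvKey false) none).1,
             (pvScanA a (PySem.List.sorted rem pvKey false) none).2) from rfl, hfstA, hc]
    refine ⟨d.modify c.1 [] (fun l => l.erase c), ?_, ?_, ?_⟩
    · simp only [pvStepB, hbfind, hc, hA, pv_sorted_discard rem h c]
    · intro lab
      rw [hA]
      simp only [pv_sorted_discard rem h c, PySem.Dict.getD_modify,
        pv_filter_erase _ hsnod c lab]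
      split_ifs with hlab
      · rw [hinv c.1, hlab]
      · rw [hinv lab]
    · rw [hA]; exact h.filter _
  | none =>
    have h1 : (pvScanA a (PySem.List.sorted rem pvKey false) none).1 = none := by
      rw [hfstA, hc]
    have hsnd := pvScanA_snd a (PySem.List.sorted rem pvKey false) none h1
    simp only [Option.or] at hsnd
    have hbnone : (d.getD a.1 []).find? (fun b => pvOverlap a b) = none := by
      rw [hbfind, hc]
    cases hd : (PySem.List.sorted rem pvKey false).find? (fun b => pvOverlap a b) with
    | some c =>
      have hA : pvStepA (rem, b0, l0, e0) a =
          (PySem.Set.discard rem c, b0, l0 + 1,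
           if e0.length < 4 then e0 ++ [pvEx "label" a c] else e0) := by
        simp only [pvStepA]
        rw [show pvScanA a (PySem.List.sorted rem pvKey false) none =
              ((pvScanA a (PySem.List.sorted rem pvKey false) none).1,
               (pvScanA a (PySem.List.sorted rem pvKey false) none).2) from rfl,
            h1, hsnd, hd]
      refine ⟨d.modify c.1 [] (fun l => l.erase c), ?_, ?_, ?_⟩
      · simp only [pvStepB, hbnone, hd, hA, pv_sorted_discard rem h c]
      · intro lab
        rw [hA]
        simp only [pv_sorted_discard rem h c, PySem.Dict.getD_modify,
          pv_filter_erase _ hsnod c lab]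
        split_ifs with hlab
        · rw [hinv c.1, hlab]
        · rw [hinv lab]
      · rw [hA]; exact h.filter _
    | none =>
      have hA : pvStepA (rem, b0, l0, e0) a = (rem, b0, l0, e0) := by
        simp only [pvStepA]
        rw [show pvScanA a (PySem.List.sorted rem pvKey false) none =
              ((pvScanA a (PySem.List.sorted rem pvKey false) none).1,
               (pvScanA a (PySem.List.sorted rem pvKey false) none).2) from rfl,
            h1, hsnd, hd]
      exact ⟨d, by simp only [pvStepB, hbnone, hd, hA], by rw [hA]; exact hinv, by rw [hA]; exact h⟩

lemma pv_fold_eq (as : List (String × Int × Int)) :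
    ∀ (rem : List (String × Int × Int))
      (d : PySem.Dict String (List (String × Int × Int))) (t : Int × Int × List String),
      rem.Nodup →
      (∀ lab, d.getD lab []
          = (PySem.List.sorted rem pvKey false).filter (fun b => b.1 == lab)) →
      (as.foldl pvStepB (d, PySem.List.sorted rem pvKey false, t)).2 =
        (PySem.List.sorted (as.foldl pvStepA (rem, t)).1 pvKey false,
         (as.foldl pvStepA (rem, t)).2) := by
  induction as with
  | nil => intro rem d t _ _; simp
  | cons a rest ih =>
    intro rem d t h hinv
    obtain ⟨d', hstep, hinv', hnd⟩ := pv_step_eq rem d t a h hinv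
    simp only [List.foldl_cons, hstep]
    have := ih (pvStepA (rem, t) a).1 d' (pvStepA (rem, t) a).2 hnd hinv'
    simpa using this

-- ===== VERDICT (by name: the statement is the Claim_ definition above) =====
theorem categorize_span_differences_spec : Claim_equal_categorize_span_differences := by
  intro a_only b_only _
  unfold Spec_categorize_span_differences
  unfold categorize_span_differences categorize_span_differences_alt
  have hfold := pv_fold_eq (PySem.List.sorted (PySem.Set.ofList a_only) pvKey false)
    (PySem.Set.ofList b_only)
    (pvBuckets (PySem.List.sorted (PySem.Set.ofList b_only) pvKey false)) (0, 0, [])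
    (PySem.Set.nodup_ofList b_only)
    (fun lab => pvBuckets_getD (PySem.List.sorted (PySem.Set.ofList b_only) pvKey false) lab)
  simp only [hfold]
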